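-- pv_equiv track=rewrite | github.com/Asylian21/btc-brute-force | filter-p2pkh.py | is_p2pkh_address
-- ===== SOURCE A (Python) =====
-- def is_p2pkh_address(address):
--     """
--     Validate if a Bitcoin address is Legacy P2PKH format.
--
--     Parameters:
--         address (str): Bitcoin address to check
--
--     Returns:
--         bool: True if address is valid P2PKH, False otherwise
--
--     Validation Criteria:
--         1. Starts with '1' (Bitcoin mainnet P2PKH version byte 0x00)
--         2. Length between 26-35 characters (typical P2PKH range)
--         3. Contains only Base58 characters (Bitcoin's encoding alphabet)
--
--     Base58 Alphabet:
--         123456789ABCDEFGHJKLMNPQRSTUVWXYZabcdefghijkmnopqrstuvwxyz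
--         (excludes: 0, O, I, l to avoid visual confusion)
--
--     Examples:
--         Valid P2PKH:
--             - 1A1zP1eP5QGefi2DMPTfTL5SLmv7DivfNa (Genesis block address)
--             - 112PkhMPGH8xrdpHuKUhueQ2rwJ7uTqzAD
--
--         Invalid (filtered out):
--             - 3J98t1WpEZ73CNmQviecrnyiWrnqRhWNLy (P2SH - starts with '3')
--             - bc1qxy2kgdygjrsqtzq2n0yrf2493p83kkfjhx0wlh (SegWit - starts with 'bc1q')
--             - bc1p5d7rjq7g6rdk... (Taproot - starts with 'bc1p')
--
--     Performance:
--         This is a lightweight validation (not full checksum verification).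
--         Full validation would require:
--         - Base58 decoding
--         - Checksum verification (double SHA256)
--         - Network byte validation
--
--         For filtering purposes, this quick check is sufficient and much faster.
--     """
--     # Remove leading/trailing whitespace
--     addr = address.strip()
--
--     # Reject empty strings
--     if not addr:
--         return False
--
--     # Check P2PKH criteria:
--     # - First character must be '1' (mainnet P2PKH)
--     # - Length must be in valid range (26-35 characters typical)
--     if addr[0] == '1' and 26 <= len(addr) <= 35:
--         # Verify all characters are valid Base58 (no 0, O, I, l)
--         # Base58 alphabet: 123456789ABCDEFGHJKLMNPQRSTUVWXYZabcdefghijkmnopqrstuvwxyz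
--         if all(c in '123456789ABCDEFGHJKLMNPQRSTUVWXYZabcdefghijkmnopqrstuvwxyz' for c in addr):
--             return True
--
--     return False
-- ===== SOURCE B (Python) =====
-- _BASE58 = frozenset('123456789ABCDEFGHJKLMNPQRSTUVWXYZabcdefghijkmnopqrstuvwxyz')
--
--
-- def is_p2pkh_address(address):
--     # Single left-to-right DFA scan; count = number of base58 chars consumed
--     # after the mandatory leading '1' (-1 = still expecting the leading '1').
--     count = -1
--     for c in address.strip():
--         if count < 0:
--             if c != '1':
--                 return False
--             count = 0
--         elif c in _BASE58 and count < 34: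
--             count += 1
--         else:
--             return False
--     return 25 <= count <= 34
-- ===== Notes on version B (the rewrite author's own statement) =====
-- stated objective: alternative
-- what changed: Replaces A's separate emptiness/first-char/length-range checks plus an all() membership pass with a single left-to-right DFA scan that keeps one counter and exits early; no length or indexing is ever computed.
import Mathlib
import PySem

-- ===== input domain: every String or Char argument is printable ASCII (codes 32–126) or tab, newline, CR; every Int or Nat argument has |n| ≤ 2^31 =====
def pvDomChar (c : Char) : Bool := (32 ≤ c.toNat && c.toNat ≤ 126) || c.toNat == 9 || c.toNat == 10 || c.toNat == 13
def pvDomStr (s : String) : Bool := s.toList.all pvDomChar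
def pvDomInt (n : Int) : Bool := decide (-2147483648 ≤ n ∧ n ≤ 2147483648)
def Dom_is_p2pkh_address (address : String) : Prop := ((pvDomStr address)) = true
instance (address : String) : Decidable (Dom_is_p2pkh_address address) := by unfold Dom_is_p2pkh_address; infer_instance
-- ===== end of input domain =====

-- B replaces A's separate emptiness/first-char/length-range checks plus an all() membership
-- pass by a single left-to-right DFA scan with one counter and early exit (alternative, same cost).

-- ===== PORT A =====
-- the base58 alphabet string A tests membership in with 'c in …'
def pvB58 : List Char := "123456789ABCDEFGHJKLMNPQRSTUVWXYZabcdefghijkmnopqrstuvwxyz".toList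

def is_p2pkh_address (address : String) : Bool :=
  -- addr = address.strip()
  let addr := PySem.Str.strip address
  -- if not addr: return False
  if addr.toList = [] then false
  else
    -- if addr[0] == '1' and 26 <= len(addr) <= 35:
    if (PySem.Str.pyGet? addr 0 == some '1')
        && (decide (26 ≤ PySem.Str.len addr) && decide (PySem.Str.len addr ≤ 35)) then
      -- if all(c in '123…xyz' for c in addr): return True
      if addr.toList.all (fun c => PySem.Chars.isIn [c] pvB58) then true
      else false
    else false

-- ===== PORT B =====
-- _BASE58 = frozenset('123456789…')
def altB58 : PySem.Set Char :=
  PySem.Set.ofList "123456789ABCDEFGHJKLMNPQRSTUVWXYZabcdefghijkmnopqrstuvwxyz".toList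

-- the for-loop of Source B: state 'count' threaded through the characters, early returns as branches
def altScan : List Char → Int → Bool
  | [], count => decide (25 ≤ count ∧ count ≤ 34)
  | c :: rest, count =>
    if count < 0 then
      if c ≠ '1' then false else altScan rest 0
    else if PySem.Set.contains altB58 c && decide (count < 34) then altScan rest (count + 1)
    else false

def is_p2pkh_address_alt (address : String) : Bool :=
  altScan (PySem.Str.strip address).toList (-1)

-- ===== PRECONDITION & SPEC =====
def Spec_is_p2pkh_address (address : String) (out : Bool) : Prop := out = is_p2pkh_address_alt address
instance (address : String) (out : Bool) : Decidable (Spec_is_p2pkh_address address out) := by unfold Spec_is_p2pkh_address; infer_instance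

-- ===== CLAIM (what is proved, stated in full; the proofs are below) =====
def Claim_equal_is_p2pkh_address : Prop := ∀ (address : String), Dom_is_p2pkh_address address → Spec_is_p2pkh_address address (is_p2pkh_address address)

-- ===== LEMMAS AND PROOFS =====

-- membership of a single character: Python's 'c in str' (substring) coincides with list membership
lemma isIn_singleton (c : Char) (l : List Char) : PySem.Chars.isIn [c] l = l.contains c := by
  by_cases h : c ∈ l
  · simp only [List.contains_eq_mem, h, decide_true]
    rw [PySem.Chars.isIn_iff_infix]
    obtain ⟨s, t, rfl⟩ := List.append_of_mem h
    exact ⟨s, t, by simp⟩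
  · simp only [List.contains_eq_mem, h, decide_false]
    rw [← Bool.not_eq_true, PySem.Chars.isIn_iff_infix]
    intro hi
    exact h (hi.mem (by simp))

-- B's frozenset holds exactly A's alphabet characters
set_option maxRecDepth 8192 in
lemma altB58_eq : altB58 = pvB58 := by decide

lemma one_mem_pvB58 : '1' ∈ pvB58 := by decide

-- loop invariant of B's scan once the leading '1' has been consumed
lemma altScan_nonneg (l : List Char) : ∀ (k : Int), 0 ≤ k → k ≤ 34 →
    altScan l k = (l.all (fun c => pvB58.contains c)
      && decide (25 ≤ k + l.length ∧ k + l.length ≤ 34)) := by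
  induction l with
  | nil =>
    intro k h0 h34
    simp [altScan]
  | cons c rest ih =>
    intro k h0 h34
    rw [altScan]
    rw [if_neg (by omega)]
    show (if PySem.Set.contains altB58 c && decide (k < 34) then altScan rest (k + 1) else false) = _
    rw [altB58_eq]
    by_cases hc : pvB58.contains c
    · have hcm : c ∈ pvB58 := by simpa using hc
      by_cases hk : k < 34
      · rw [if_pos (by simp [hcm, hk]), ih (k + 1) (by omega) (by omega)]
        simp only [List.all_cons, hc, Bool.true_and, List.length_cons]
        congr 1
        simp only [decide_eq_decide]
        push_cast
        omega
      · rw [if_neg (by simp [hk])]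
        have hno : ¬ (25 ≤ k + ((c :: rest).length : Int) ∧ k + ((c :: rest).length : Int) ≤ 34) := by
          simp only [List.length_cons]
          push_cast
          omega
        simp only [hno, decide_false, Bool.and_false]
    · have hcm : c ∉ pvB58 := by simpa using hc
      rw [if_neg (by simp [hcm])]
      simp [List.all_cons, hcm]

-- ===== VERDICT (by name: the statement is the Claim_ definition above) =====
theorem is_p2pkh_address_spec : Claim_equal_is_p2pkh_address := by
  intro address _
  unfold Spec_is_p2pkh_address is_p2pkh_address is_p2pkh_address_alt
  set addr := PySem.Str.strip address with haddr
  clear haddr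
  rcases h : addr.toList with _ | ⟨c, rest⟩
  · rw [if_pos h]
    rw [altScan]
    simp
  · have hget : PySem.Str.pyGet? addr 0 = some c := by
      simp [pysem, PySem.Str.pyGet?, h]
    have hlen : PySem.Str.len addr = ((rest.length : Int) + 1) := by
      simp [pysem, h]
    rw [if_neg (by simp [h])]
    rw [show altScan (c :: rest) (-1) = if c ≠ '1' then false else altScan rest 0 from by
          rw [altScan]; norm_num]
    rw [hget, hlen]
    by_cases hc : c = '1'
    · subst hc
      rw [show (if ('1' : Char) ≠ '1' then false else altScan rest 0) = altScan rest 0 from by simp]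
      rw [altScan_nonneg rest 0 (by omega) (by omega)]
      by_cases hlen' : 26 ≤ (rest.length : Int) + 1 ∧ (rest.length : Int) + 1 ≤ 35
      · rw [if_pos (by simp; omega)]
        have hall : (('1' :: rest).all fun x => PySem.Chars.isIn [x] pvB58)
            = rest.all (fun x => pvB58.contains x) := by
          simp [isIn_singleton, one_mem_pvB58]
        have hrange : decide (25 ≤ (0:Int) + rest.length ∧ (0:Int) + rest.length ≤ 34) = true := by
          simp only [decide_eq_true_eq]
          omega
        rw [hrange, Bool.and_true, h, hall]
        cases hb : rest.all (fun x => pvB58.contains x) <;> simp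
      · rw [if_neg (by simp; omega)]
        have hno : ¬ (25 ≤ (0:Int) + (rest.length : Int) ∧ (0:Int) + (rest.length : Int) ≤ 34) := by
          omega
        simp only [hno, decide_false, Bool.and_false]
    · rw [if_neg (by simp [hc])]
      rw [if_pos hc]
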